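-- pv_equiv track=rewrite | github.com/stansn96/Master-thesis-short | bootstrapnopreproc.py | result_cap
-- ===== SOURCE A (Python) =====
-- from operator import itemgetter
--
-- def result_cap(results, threshmax, threshmin):
--
-- 	tuplist, maxtup, mintup = [], [], []
-- 	for index, result in enumerate(results):
-- 		tuplist.append((result, index))
-- 	for tup in tuplist:
-- 		if tup[0] > threshmax:
-- 			maxtup.append(tup)
-- 			if len(maxtup) > 5:
-- 				maxtup.sort(key=itemgetter(0), reverse=True)
-- 				maxtup.pop()
-- 		if tup[0] < threshmin:
-- 			mintup.append(tup)
-- 			if len(mintup) > 5: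
-- 				mintup.sort(key=itemgetter(0))
-- 				mintup.pop()
--
-- 	if len(maxtup) > len(mintup):
-- 		maxtup.sort(key=itemgetter(0), reverse=True)
-- 		mintup.sort(key=itemgetter(0))
-- 		maxtup = maxtup[:len(mintup)]
-- 	elif len(maxtup) < len(mintup):
-- 		mintup.sort(key=itemgetter(0))
-- 		maxtup.sort(key=itemgetter(0), reverse=True)
-- 		mintup = mintup[:len(maxtup)]
--
-- 	return maxtup, mintup
-- ===== SOURCE B (Python) =====
-- from operator import itemgetter
--
-- def result_cap(results, threshmax, threshmin):
--     maxtup = [(r, i) for i, r in enumerate(results) if r > threshmax]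
--     mintup = [(r, i) for i, r in enumerate(results) if r < threshmin]
--     if len(maxtup) > 5:
--         maxtup = sorted(maxtup, key=itemgetter(0), reverse=True)[:5]
--     if len(mintup) > 5:
--         mintup = sorted(mintup, key=itemgetter(0))[:5]
--
--     if len(maxtup) > len(mintup):
--         maxtup.sort(key=itemgetter(0), reverse=True)
--         mintup.sort(key=itemgetter(0))
--         maxtup = maxtup[:len(mintup)]
--     elif len(maxtup) < len(mintup):
--         mintup.sort(key=itemgetter(0))
--         maxtup.sort(key=itemgetter(0), reverse=True)
--         mintup = mintup[:len(maxtup)]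
--
--     return maxtup, mintup
-- ===== Notes on version B (the rewrite author's own statement) =====
-- stated objective: simpler
-- what changed: A maintains the top/bottom lists in one streaming pass, re-sorting and evicting whenever a capped list exceeds 5; B collects all candidates with two comprehensions and, only when a list exceeds 5, sorts it once (stable) and slices the first 5, keeping the final balancing block.
import Mathlib
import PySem

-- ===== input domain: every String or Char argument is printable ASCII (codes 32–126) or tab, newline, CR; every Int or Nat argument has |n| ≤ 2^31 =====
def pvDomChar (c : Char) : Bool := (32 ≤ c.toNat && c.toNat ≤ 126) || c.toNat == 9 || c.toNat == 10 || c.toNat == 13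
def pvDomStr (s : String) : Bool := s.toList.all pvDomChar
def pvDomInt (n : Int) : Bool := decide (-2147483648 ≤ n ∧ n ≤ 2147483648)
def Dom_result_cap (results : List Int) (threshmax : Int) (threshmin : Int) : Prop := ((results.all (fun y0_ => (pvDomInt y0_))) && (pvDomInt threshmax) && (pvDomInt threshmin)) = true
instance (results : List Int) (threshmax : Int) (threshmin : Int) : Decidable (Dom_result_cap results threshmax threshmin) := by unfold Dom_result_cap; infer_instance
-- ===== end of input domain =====

-- B collects all candidates with two comprehensions and sorts/slices once at the end
-- instead of A's streaming capped sort-and-pop; the final balancing block is the same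
-- in both Pythons, so both ports share the literal transliteration `pvBalance`.

-- ===== PORT A =====
-- the body of A's `if len(...) > 5: sort; pop` block (pop() = dropLast)
def pvCapAdd (rev : Bool) (s : List (Int × Int)) (tup : Int × Int) : List (Int × Int) :=
  let m := s ++ [tup]
  if 5 < m.length then (PySem.List.sorted m (fun t => t.1) rev).dropLast else m

-- the final balancing block, identical source code in A and in B (slices `[:len]` with a
-- nonnegative in-range length are List.take)
def pvBalance (maxtup mintup : List (Int × Int)) : (List (Int × Int)) × (List (Int × Int)) :=
  if mintup.length < maxtup.length then
    ((PySem.List.sorted maxtup (fun t => t.1) true).take mintup.length,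
     PySem.List.sorted mintup (fun t => t.1) false)
  else if maxtup.length < mintup.length then
    (PySem.List.sorted maxtup (fun t => t.1) true,
     (PySem.List.sorted mintup (fun t => t.1) false).take maxtup.length)
  else (maxtup, mintup)

def result_cap (results : List Int) (threshmax : Int) (threshmin : Int) : (List (Int × Int)) × (List (Int × Int)) :=
  let tuplist : List (Int × Int) :=
    (PySem.List.enumerate results).foldl (fun acc p => acc ++ [(p.2, p.1)]) []
  let st := tuplist.foldl
    (fun (mm : List (Int × Int) × List (Int × Int)) tup =>
      (if threshmax < tup.1 then pvCapAdd true mm.1 tup else mm.1,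
       if tup.1 < threshmin then pvCapAdd false mm.2 tup else mm.2)) ([], [])
  pvBalance st.1 st.2

-- ===== PORT B =====
def result_cap_alt (results : List Int) (threshmax : Int) (threshmin : Int) : (List (Int × Int)) × (List (Int × Int)) :=
  let maxtup0 : List (Int × Int) :=
    ((PySem.List.enumerate results).filter (fun p => decide (threshmax < p.2))).map (fun p => (p.2, p.1))
  let mintup0 : List (Int × Int) :=
    ((PySem.List.enumerate results).filter (fun p => decide (p.2 < threshmin))).map (fun p => (p.2, p.1))
  let maxtup := if 5 < maxtup0.length then (PySem.List.sorted maxtup0 (fun t => t.1) true).take 5 else maxtup0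
  let mintup := if 5 < mintup0.length then (PySem.List.sorted mintup0 (fun t => t.1) false).take 5 else mintup0
  pvBalance maxtup mintup

-- ===== PRECONDITION & SPEC =====
def Spec_result_cap (results : List Int) (threshmax : Int) (threshmin : Int) (out : (List (Int × Int)) × (List (Int × Int))) : Prop := out = result_cap_alt results threshmax threshmin
instance (results : List Int) (threshmax : Int) (threshmin : Int) (out : (List (Int × Int)) × (List (Int × Int))) : Decidable (Spec_result_cap results threshmax threshmin out) := by unfold Spec_result_cap; infer_instance

-- ===== CLAIM (what is proved, stated in full; the proofs are below) =====
def Claim_equal_result_cap : Prop := ∀ (results : List Int) (threshmax : Int) (threshmin : Int), Dom_result_cap results threshmax threshmin → Spec_result_cap results threshmax threshmin (result_cap results threshmax threshmin)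

-- ===== LEMMAS AND PROOFS =====

-- a fold updating the two components independently, each guarded by its own test,
-- is the pair of folds over the filtered lists
lemma pv_foldl_pair_split {α β γ : Type} (f : β → α → β) (g : γ → α → γ)
    (P Q : α → Prop) [DecidablePred P] [DecidablePred Q] :
    ∀ (xs : List α) (a : β) (b : γ),
      xs.foldl (fun mm t => (if P t then f mm.1 t else mm.1, if Q t then g mm.2 t else mm.2)) (a, b)
      = ((xs.filter (fun t => decide (P t))).foldl f a,
         (xs.filter (fun t => decide (Q t))).foldl g b) := by
  intro xs
  induction xs with
  | nil => intro a b; simp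
  | cons x xs ih =>
    intro a b
    by_cases hP : P x <;> by_cases hQ : Q x <;>
      simp [hP, hQ, ih]

def pvBefore (rev : Bool) (a b : Int × Int) : Bool :=
  if rev then decide (b.1 < a.1) else decide (a.1 < b.1)

lemma pv_sorted_snoc (rev : Bool) (xs : List (Int × Int)) (t : Int × Int) :
    PySem.List.sorted (xs ++ [t]) (fun x => x.1) rev
      = PySem.List.insertBy (pvBefore rev) t (PySem.List.sorted xs (fun x => x.1) rev) := by
  cases rev <;> simp [PySem.List.sorted, List.foldl_append] <;> rfl

lemma pv_length_insertBy {α : Type} (bf : α → α → Bool) (t : α) :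
    ∀ l : List α, (PySem.List.insertBy bf t l).length = l.length + 1 := by
  intro l
  induction l with
  | nil => simp [PySem.List.insertBy]
  | cons y ys ih =>
    by_cases h : bf t y = true <;> simp [PySem.List.insertBy, h, ih]

lemma pv_insertBy_take {α : Type} (bf : α → α → Bool) (t : α) :
    ∀ (n : Nat) (L : List α), n ≤ L.length →
      (PySem.List.insertBy bf t (L.take n)).take n = (PySem.List.insertBy bf t L).take n := by
  intro n
  induction n with
  | zero => intro L _; simp
  | succ n ih =>
    intro L hL
    cases L with
    | nil => simp at hL
    | cons y ys =>
      by_cases h : bf t y = true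
      · cases n with
        | zero => simp [PySem.List.insertBy, h]
        | succ m =>
          simp [PySem.List.insertBy, h, List.take_take]
      · have hys : n ≤ ys.length := by simpa using hL
        simp [PySem.List.insertBy, h, ih ys hys]

-- the take of a sorted list is still sorted (stable sort leaves it unchanged)
lemma pv_sorted_take_self (rev : Bool) (F : List (Int × Int)) (n : Nat) :
    PySem.List.sorted ((PySem.List.sorted F (fun t => t.1) rev).take n) (fun t => t.1) rev
      = (PySem.List.sorted F (fun t => t.1) rev).take n := by
  cases rev
  · exact PySem.List.sorted_eq_self_of_pairwise _ _
      ((PySem.List.sorted_pairwise F (fun t => t.1)).sublist (List.take_sublist _ _))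
  · exact PySem.List.sorted_rev_eq_self_of_pairwise _ _
      ((PySem.List.sorted_pairwise_rev F (fun t => t.1)).sublist (List.take_sublist _ _))

-- A's streaming capped-eviction pass equals B's batch "sort once, take 5" selection
lemma pv_stream_eq (rev : Bool) :
    ∀ F : List (Int × Int),
      F.foldl (pvCapAdd rev) []
        = if F.length ≤ 5 then F else (PySem.List.sorted F (fun t => t.1) rev).take 5 := by
  intro F
  induction F using List.reverseRecOn with
  | nil => simp
  | append_singleton F t ih =>
    rw [List.foldl_append, List.foldl_cons, List.foldl_nil, ih]
    by_cases h5 : F.length ≤ 5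
    · rw [if_pos h5]
      by_cases h4 : F.length + 1 ≤ 5
      · have hc : ¬ 5 < (F ++ [t]).length := by simp; omega
        have hd : (F ++ [t]).length ≤ 5 := by simp; omega
        simp only [pvCapAdd]
        rw [if_neg hc, if_pos hd]
      · have hF5 : F.length = 5 := by omega
        have hlen : (F ++ [t]).length = 6 := by simp [hF5]
        have hlt : 5 < (F ++ [t]).length := by omega
        have hslen : (PySem.List.sorted (F ++ [t]) (fun t => t.1) rev).length = 6 := by
          rw [PySem.List.length_sorted]; exact hlen
        simp only [pvCapAdd, if_pos hlt]
        rw [List.dropLast_eq_take, hslen, if_neg (by rw [hlen]; omega)]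
    · rw [if_neg h5]
      have hFlen : 5 ≤ F.length := by omega
      have hslen : (PySem.List.sorted F (fun t => t.1) rev).length = F.length :=
        PySem.List.length_sorted F _ rev
      have htlen : ((PySem.List.sorted F (fun t => t.1) rev).take 5).length = 5 := by
        simp [hslen]; omega
      have hlt : 5 < ((PySem.List.sorted F (fun t => t.1) rev).take 5 ++ [t]).length := by
        simp [htlen]
      have h6 : ¬ (F ++ [t]).length ≤ 5 := by simp; omega
      simp only [pvCapAdd, if_pos hlt, if_neg h6]
      rw [pv_sorted_snoc, pv_sorted_take_self, pv_sorted_snoc]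
      rw [List.dropLast_eq_take, pv_length_insertBy, htlen]
      exact pv_insertBy_take (pvBefore rev) t 5 _ (by omega)

lemma pv_tuplist_eq (results : List Int) :
    (PySem.List.enumerate results).foldl (fun acc (p : Int × Int) => acc ++ [(p.2, p.1)]) []
      = (PySem.List.enumerate results).map (fun p => (p.2, p.1)) := by
  simpa using PySem.List.foldl_append_singleton_eq_map
    (fun p : Int × Int => (p.2, p.1)) (PySem.List.enumerate results) []

-- flip "if len ≤ 5 then F else T" into B's "if 5 < len then T else F"
lemma pv_ite_flip {γ : Type} (n : Nat) (x y : γ) :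
    (if n ≤ 5 then x else y) = (if 5 < n then y else x) := by
  split_ifs with h1 h2 <;> first | rfl | omega

-- ===== VERDICT (by name: the statement is the Claim_ definition above) =====
theorem result_cap_spec : Claim_equal_result_cap := by
  intro results threshmax threshmin _
  simp only [Spec_result_cap, result_cap, result_cap_alt, pv_tuplist_eq,
    pv_foldl_pair_split (pvCapAdd true) (pvCapAdd false)
      (fun t : Int × Int => threshmax < t.1) (fun t : Int × Int => t.1 < threshmin),
    List.filter_map, Function.comp_def, pv_stream_eq, List.length_map, pv_ite_flip]
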